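-- pv_equiv track=rewrite | github.com/Geneocide/AoC2023 | 07/camelCardsJacksWild.py | getUniqueCount
-- ===== SOURCE A (Python) =====
-- def getUniqueCount(hand):
--     if 1 in hand:  # if there any wilds
--         frequencies = sorted(
--             getFrequencies(hand).items(), key=lambda x: x[1], reverse=True
--         )
--         for frequency in frequencies:
--             if frequency[0] != 1:  # most common card that's not a wild
--                 for i in range(len(hand)):
--                     if hand[i] == 1:
--                         hand[i] = frequency[
--                             0
--                         ]  # set wilds to that most common card, to get best possible hands with wilds
--                 break  # break out of seach for highest frequency once found
--
--     return len(set(hand))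
--
-- def getFrequencies(hand):
--     f = {}
--     for char in hand:
--         f[char] = f.get(char, 0) + 1
--     return f
-- ===== SOURCE B (Python) =====
-- def getUniqueCount(hand):
--     if 1 in hand:  # any wilds?
--         counts = {}
--         for card in hand:  # frequency table of non-wild cards only
--             if card != 1:
--                 counts[card] = counts.get(card, 0) + 1
--         if counts:  # unless every card is a wild
--             target = max(counts, key=counts.get)  # most common non-wild card
--             for i in range(len(hand)):
--                 if hand[i] == 1:
--                     hand[i] = target  # wilds become the most common card
--     return len(set(hand))
-- ===== Notes on version B (the rewrite author's own statement) =====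
-- stated objective: simpler
-- what changed: B builds a frequency table of the non-wild cards only and picks the replacement with a single max keyed by count (first-occurrence tie-break), instead of sorting all frequencies descending and scanning for the first non-wild entry.
import Mathlib
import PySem

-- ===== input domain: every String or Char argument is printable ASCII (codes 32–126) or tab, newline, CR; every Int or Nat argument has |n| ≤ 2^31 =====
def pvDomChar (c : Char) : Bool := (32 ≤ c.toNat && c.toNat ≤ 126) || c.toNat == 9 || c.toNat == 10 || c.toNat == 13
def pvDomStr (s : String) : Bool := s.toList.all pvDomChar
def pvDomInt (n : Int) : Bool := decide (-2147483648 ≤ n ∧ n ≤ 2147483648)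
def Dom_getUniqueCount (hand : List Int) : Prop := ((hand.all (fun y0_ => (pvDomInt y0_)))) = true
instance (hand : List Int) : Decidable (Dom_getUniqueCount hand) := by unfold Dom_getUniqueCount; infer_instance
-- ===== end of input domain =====

-- B replaces A's sort-all-frequencies-then-scan with a non-wild-only counter and one max
-- keyed by count; equivalence proved on the RETURN value (both Pythons mutate `hand` alike).

-- ===== PORT A =====
def getFrequencies (hand : List Int) : PySem.Dict Int Int :=
  hand.foldl (fun f char => f.insert char (f.getD char 0 + 1)) PySem.Dict.empty

def getUniqueCount (hand : List Int) : Int :=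
  if 1 ∈ hand then
    let frequencies := PySem.List.sorted (getFrequencies hand).items (fun x => x.2) true
    match frequencies.find? (fun frequency => frequency.1 != 1) with
    | some frequency =>
        ((PySem.Set.ofList (hand.map (fun c => if c = 1 then frequency.1 else c))).length : Int)
    | none => ((PySem.Set.ofList hand).length : Int)
  else ((PySem.Set.ofList hand).length : Int)

-- ===== PORT B =====
def getUniqueCount_alt (hand : List Int) : Int :=
  if 1 ∈ hand then
    let counts := hand.foldl
      (fun d card => if card ≠ 1 then d.insert card (d.getD card 0 + 1) else d)
      (PySem.Dict.empty : PySem.Dict Int Int)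
    if counts.size ≠ 0 then
      match PySem.List.max? counts.keys (fun k => counts.getD k 0) with
      | some target =>
          ((PySem.Set.ofList (hand.map (fun c => if c = 1 then target else c))).length : Int)
      | none => ((PySem.Set.ofList hand).length : Int)
    else ((PySem.Set.ofList hand).length : Int)
  else ((PySem.Set.ofList hand).length : Int)

-- ===== PRECONDITION & SPEC =====
def Spec_getUniqueCount (hand : List Int) (out : Int) : Prop := out = getUniqueCount_alt hand
instance (hand : List Int) (out : Int) : Decidable (Spec_getUniqueCount hand out) := by unfold Spec_getUniqueCount; infer_instance

-- ===== CLAIM (what is proved, stated in full; the proofs are below) =====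
def Claim_equal_getUniqueCount : Prop := ∀ (hand : List Int), Dom_getUniqueCount hand → Spec_getUniqueCount hand (getUniqueCount hand)

-- ===== LEMMAS AND PROOFS =====

-- len(set(l)) is the number of distinct elements
theorem setLen_eq_card (l : List Int) :
    (PySem.Set.ofList l).length = l.toFinset.card := by
  have hnd := PySem.Set.nodup_ofList (xs := l)
  have hfe : (PySem.Set.ofList l).toFinset = l.toFinset := by
    ext y; simp [PySem.Set.mem_ofList]
  rw [← hfe, List.toFinset_card_of_nodup hnd]

-- replacing every 1 by a non-wild element already in the list erases 1 from the set
theorem map_replace_toFinset (hand : List Int) (x : Int)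
    (hx : x ∈ hand) (hx1 : x ≠ 1) :
    (hand.map (fun c => if c = 1 then x else c)).toFinset = hand.toFinset.erase 1 := by
  ext y
  simp only [List.mem_toFinset, List.mem_map, Finset.mem_erase]
  constructor
  · rintro ⟨c, hc, hyc⟩
    by_cases h1 : c = 1
    · subst h1; simp at hyc; subst hyc; exact ⟨hx1, hx⟩
    · simp [h1] at hyc; subst hyc; exact ⟨h1, hc⟩
  · rintro ⟨hy1, hy⟩
    exact ⟨y, hy, by simp [hy1]⟩

-- hence len(set(hand with wilds replaced by x)) does not depend on which non-wild x is used
theorem replaced_count (hand : List Int) (x : Int) (hx : x ∈ hand) (hx1 : x ≠ 1) :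
    (PySem.Set.ofList (hand.map (fun c => if c = 1 then x else c))).length
      = (hand.toFinset.erase 1).card := by
  rw [setLen_eq_card, map_replace_toFinset hand x hx hx1]

-- every first component in A's frequency list is a card of the hand
theorem fst_mem_of_mem_items (hand : List Int) (p : Int × Int)
    (hp : p ∈ (PySem.Dict.counter hand).items) : p.1 ∈ hand := by
  rw [PySem.Dict.items_counter] at hp
  obtain ⟨k, hk, hkp⟩ := List.mem_map.mp hp
  rw [← hkp]
  exact (PySem.Set.mem_ofList _ _).mp hk

-- ===== VERDICT (by name: the statement is the Claim_ definition above) =====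
theorem getUniqueCount_spec : Claim_equal_getUniqueCount := by
  intro hand _
  unfold Spec_getUniqueCount getUniqueCount getUniqueCount_alt
  by_cases h1 : (1 : Int) ∈ hand
  · simp only [h1, if_true]
    have hfreq : getFrequencies hand = PySem.Dict.counter hand := rfl
    have hcounts : hand.foldl
        (fun d card => if card ≠ 1 then d.insert card (d.getD card 0 + 1) else d)
        (PySem.Dict.empty : PySem.Dict Int Int)
        = PySem.Dict.counter (hand.filter (fun c => decide (c ≠ 1))) := by
      rw [PySem.List.foldl_ite_eq_foldl_filter]
      exact PySem.Dict.foldl_insert_getD_add_one_eq_counter _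
    rw [hfreq, hcounts]
    set F := hand.filter (fun c => decide (c ≠ 1)) with hF
    by_cases hw : ∃ c ∈ hand, c ≠ 1
    · obtain ⟨c, hc, hc1⟩ := hw
      -- A side: find? succeeds with a non-wild card of the hand
      have hcL : ((c, (hand.count c : Int)) : Int × Int)
          ∈ PySem.List.sorted (PySem.Dict.counter hand).items (fun x => x.2) true := by
        rw [PySem.List.mem_sorted, PySem.Dict.items_counter]
        exact List.mem_map.mpr ⟨c, (PySem.Set.mem_ofList _ _).mpr hc, rfl⟩
      cases hfind : (PySem.List.sorted (PySem.Dict.counter hand).items (fun x => x.2) true).find?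
          (fun frequency => frequency.1 != 1) with
      | none =>
          exfalso
          have := List.find?_eq_none.mp hfind _ hcL
          simp [hc1] at this
      | some m =>
          have hm1 : m.1 ≠ 1 := by
            have := List.find?_some hfind
            simpa using this
          have hmhand : m.1 ∈ hand := by
            have hmL := List.mem_of_find?_eq_some hfind
            rw [PySem.List.mem_sorted] at hmL
            exact fst_mem_of_mem_items hand m hmL
          -- B side: counts is nonempty and max? yields a non-wild card of the hand
          have hcF : c ∈ F := by
            rw [hF, List.mem_filter]; simp [hc, hc1]
          have hsize : (PySem.Dict.counter F).size ≠ 0 := by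
            intro h0
            have : (PySem.Dict.counter F).keys.length = 0 := by
              simp only [PySem.Dict.keys, List.length_map]
              exact h0
            rw [PySem.Dict.keys_counter] at this
            have : c ∉ PySem.Set.ofList F := by
              intro hmem
              rw [List.length_eq_zero_iff] at this
              simp [this] at hmem
            exact this ((PySem.Set.mem_ofList _ _).mpr hcF)
          cases hmax : PySem.List.max? (PySem.Dict.counter F).keys
              (fun k => (PySem.Dict.counter F).getD k 0) with
          | none =>
              exfalso
              rw [PySem.List.max?_eq_none_iff, PySem.Dict.keys_counter] at hmax
              have := (PySem.Set.mem_ofList F c).mpr hcF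
              simp [hmax] at this
          | some target =>
              have htF : target ∈ F := by
                have := PySem.List.max?_mem hmax
                rw [PySem.Dict.keys_counter, PySem.Set.mem_ofList] at this
                exact this
              rw [hF, List.mem_filter] at htF
              have hthand : target ∈ hand := htF.1
              have ht1 : target ≠ 1 := by simpa using htF.2
              show ((PySem.Set.ofList (hand.map (fun c => if c = 1 then m.1 else c))).length : Int)
                  = if (PySem.Dict.counter F).size ≠ 0 then
                      ((PySem.Set.ofList (hand.map (fun c => if c = 1 then target else c))).length : Int)
                    else ((PySem.Set.ofList hand).length : Int)
              rw [if_pos hsize, replaced_count hand m.1 hmhand hm1,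
                replaced_count hand target hthand ht1]
    · -- every card is a wild: A finds no non-wild frequency, B's counter is empty
      push Not at hw
      have hfind : (PySem.List.sorted (PySem.Dict.counter hand).items (fun x => x.2) true).find?
          (fun frequency => frequency.1 != 1) = none := by
        rw [List.find?_eq_none]
        intro p hp
        rw [PySem.List.mem_sorted] at hp
        have := hw p.1 (fst_mem_of_mem_items hand p hp)
        simp [this]
      have hFnil : F = [] := by
        rw [hF, List.filter_eq_nil_iff]
        intro a ha
        simpa using hw a ha
      rw [hfind, hFnil]
      simp [PySem.Dict.counter]
  · simp only [h1, if_false]
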